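-- pv_equiv track=rewrite | github.com/Tanish013/Poker | poker_winner.py | max_card
-- ===== SOURCE A (Python) =====
-- def max_card(ranks,cards):
--     a = []
--     for i in ranks:
--         i=i.split()
--         a.append(cards[i[0]])
--     b = max(a)
--     for i in ranks:
--         c = i
--         i=i.split()
--         if(b==cards[i[0]]):
--             return c
-- ===== SOURCE B (Python) =====
-- def max_card(ranks, cards):
--     return max(ranks, key=lambda r: cards[r.split()[0]])
-- ===== Notes on version B (the rewrite author's own statement) =====
-- stated objective: idiomatic
-- what changed: A builds a list of all card values, takes max of it, then rescans the ranks for the first match; B is a single argmax pass (max with a key function) relying on max returning the first maximal element.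
import Mathlib
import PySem

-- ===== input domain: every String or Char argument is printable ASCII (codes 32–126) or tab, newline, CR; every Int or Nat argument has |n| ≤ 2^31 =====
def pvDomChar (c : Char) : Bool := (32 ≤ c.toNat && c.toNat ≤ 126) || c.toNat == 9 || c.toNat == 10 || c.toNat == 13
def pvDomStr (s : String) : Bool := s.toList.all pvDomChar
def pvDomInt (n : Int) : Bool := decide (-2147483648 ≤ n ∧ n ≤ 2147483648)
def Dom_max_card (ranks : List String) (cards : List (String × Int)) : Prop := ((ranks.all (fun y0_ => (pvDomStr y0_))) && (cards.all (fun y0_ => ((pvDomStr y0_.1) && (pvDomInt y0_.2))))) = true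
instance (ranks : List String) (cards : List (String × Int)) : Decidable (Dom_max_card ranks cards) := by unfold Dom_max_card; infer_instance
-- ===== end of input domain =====

-- B is the idiomatic one-pass argmax (max with a key); A builds the value list, takes its max, then rescans for the first match.

-- shared helper: cards[r.split()[0]] as an Option (none exactly where Python raises IndexError/KeyError)
def pvKey? (cards : List (String × Int)) (r : String) : Option Int :=
  ((PySem.Str.split₀ r).head?).bind (fun w => PySem.Dict.get? ⟨cards⟩ w)

-- total version used inside the ports; Pre_ guarantees pvKey? is some, so the default is never reached
def pvKey (cards : List (String × Int)) (r : String) : Int :=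
  (pvKey? cards r).getD 0

-- ===== PORT A =====
def max_card (ranks : List String) (cards : List (String × Int)) : String :=
  -- a = []; for i in ranks: a.append(cards[i.split()[0]])
  let a : List Int := ranks.foldl (fun acc i => acc ++ [pvKey cards i]) []
  -- b = max(a)   (ValueError on empty a is excluded by Pre_)
  let b : Int := (PySem.List.max? a (fun v => v)).getD 0
  -- second loop: return the first i with b == cards[i.split()[0]]; falling off returns None (never happens under Pre_)
  (ranks.find? (fun i => b == pvKey cards i)).getD ""

-- ===== PORT B =====
def max_card_alt (ranks : List String) (cards : List (String × Int)) : String :=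
  -- max(ranks, key=lambda r: cards[r.split()[0]])   (ValueError on empty ranks excluded by Pre_)
  (PySem.List.max? ranks (fun r => pvKey cards r)).getD ""

-- ===== PRECONDITION & SPEC =====
-- Pre_ excludes exactly the inputs where A raises: empty ranks (ValueError from max),
-- a rank with no words (IndexError), or a first word absent from cards (KeyError).
def Pre_max_card (ranks : List String) (cards : List (String × Int)) : Prop :=
  ranks ≠ [] ∧ ∀ r ∈ ranks,
    PySem.Str.split₀ r ≠ [] ∧ (PySem.Str.split₀ r).headD "" ∈ cards.map Prod.fst
instance (ranks : List String) (cards : List (String × Int)) : Decidable (Pre_max_card ranks cards) := by unfold Pre_max_card; infer_instance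

def pvWitness_max_card : List String × (List (String × Int)) :=
  (["pair x", "flush y", "pair z"], [("pair", 2), ("flush", 6)])

def Spec_max_card (ranks : List String) (cards : List (String × Int)) (out : String) : Prop := out = max_card_alt ranks cards
instance (ranks : List String) (cards : List (String × Int)) (out : String) : Decidable (Spec_max_card ranks cards out) := by unfold Spec_max_card; infer_instance

-- ===== CLAIM (what is proved, stated in full; the proofs are below) =====
def Claim_equal_max_card : Prop := ∀ (ranks : List String) (cards : List (String × Int)), Dom_max_card ranks cards → Pre_max_card ranks cards → Spec_max_card ranks cards (max_card ranks cards)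

-- ===== LEMMAS AND PROOFS =====

-- the fold step of PySem.List.max? (named, so lemmas can state it)
def pvStep (key : String → Int) (acc : Option String) (x : String) : Option String :=
  match acc with
  | none => some x
  | some m => if key m < key x then some x else some m

def pvStepI (acc : Option Int) (x : Int) : Option Int :=
  match acc with
  | none => some x
  | some m => if m < x then some x else some m

theorem pv_max?_eq_foldl (key : String → Int) (xs : List String) :
    PySem.List.max? xs key = xs.foldl (pvStep key) none := by
  simp only [PySem.List.max?]
  apply PySem.List.foldl_congr_mem
  intro acc x _
  cases acc <;> rfl

theorem pv_maxI?_eq_foldl (xs : List Int) :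
    PySem.List.max? xs (fun v => v) = xs.foldl pvStepI none := by
  simp only [PySem.List.max?]
  apply PySem.List.foldl_congr_mem
  intro acc x _
  cases acc <;> rfl

-- the max of the mapped keys is the key of the argmax
theorem pv_max_map (key : String → Int) (t : List String) (a : Option String) :
    List.foldl pvStepI (a.map key) (t.map key) = Option.map key (List.foldl (pvStep key) a t) := by
  induction t generalizing a with
  | nil => rfl
  | cons b t ih =>
      cases a with
      | none => simpa [pvStep, pvStepI] using ih (some b)
      | some m =>
          simp only [List.map_cons, List.foldl_cons, Option.map_some, pvStep, pvStepI]
          by_cases h : key m < key b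
          · simp only [if_pos h]; simpa using ih (some b)
          · simp only [if_neg h]; simpa using ih (some m)

-- a fold started from some never returns none
theorem pv_foldl_ne_none (key : String → Int) (s : List String) (a : String) :
    List.foldl (pvStep key) (some a) s ≠ none := by
  induction s generalizing a with
  | nil => simp
  | cons b s ih =>
      simp only [List.foldl_cons, pvStep]
      by_cases h : key a < key b
      · simp only [if_pos h]; exact ih b
      · simp only [if_neg h]; exact ih a

-- the foldl-style max? keeps the FIRST maximal element: if it strictly improved past a,
-- the winner is findable in the tail by its key
theorem pv_first_max (key : String → Int) (t : List String) (a m : String)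
    (h : List.foldl (pvStep key) (some a) t = some m) :
    m = a ∨ (key a < key m ∧ t.find? (fun y => key m == key y) = some m) := by
  induction t generalizing a with
  | nil => left; simpa using h.symm
  | cons b t ih =>
      simp only [List.foldl_cons, pvStep] at h
      by_cases hab : key a < key b
      · simp only [if_pos hab] at h
        rcases ih b h with rfl | ⟨hbm, hfind⟩
        · right
          refine ⟨hab, ?_⟩
          rw [List.find?_cons_of_pos]; simp
        · right
          refine ⟨lt_trans hab hbm, ?_⟩
          rw [List.find?_cons_of_neg]
          · exact hfind
          · simp only [beq_iff_eq]; omega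
      · simp only [if_neg hab] at h
        rcases ih a h with rfl | ⟨ham, hfind⟩
        · left; rfl
        · right
          refine ⟨ham, ?_⟩
          rw [List.find?_cons_of_neg]
          · exact hfind
          · simp only [beq_iff_eq]; omega

-- the whole claim for a nonempty list, generic in the key function
theorem pv_main (key : String → Int) (x : String) (t : List String) :
    (List.find? (fun i => (PySem.List.max? ((x :: t).map key) (fun v => v)).getD 0 == key i) (x :: t)).getD ""
    = (PySem.List.max? (x :: t) key).getD "" := by
  rw [pv_max?_eq_foldl]
  simp only [List.foldl_cons]
  have hstep : pvStep key none x = some x := rfl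
  rw [hstep]
  cases hm : List.foldl (pvStep key) (some x) t with
  | none => exact absurd hm (pv_foldl_ne_none key t x)
  | some m =>
      have hb : (PySem.List.max? ((x :: t).map key) (fun v => v)).getD 0 = key m := by
        rw [pv_maxI?_eq_foldl]
        have h1 : ((x :: t).map key).foldl pvStepI none
            = Option.map key (List.foldl (pvStep key) (some x) t) := by
          simp only [List.map_cons, List.foldl_cons]
          have : pvStepI none (key x) = (Option.map key (some x)) := rfl
          rw [this]
          exact pv_max_map key t (some x)
        rw [h1, hm]; rfl
      simp only [hb]
      rcases pv_first_max key t x m hm with rfl | ⟨hxm, hfind⟩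
      · rw [List.find?_cons_of_pos] ; simp
      · rw [List.find?_cons_of_neg, hfind]
        simp only [beq_iff_eq]; omega

-- ===== VERDICT (by name: the statement is the Claim_ definition above) =====
theorem max_card_spec : Claim_equal_max_card := by
  intro ranks cards _ hpre
  obtain ⟨hne, _⟩ := hpre
  unfold Spec_max_card max_card max_card_alt
  rw [PySem.List.foldl_append_singleton_eq_map]
  simp only [List.nil_append]
  obtain ⟨x, t, rfl⟩ := List.exists_cons_of_ne_nil hne
  exact pv_main (fun r => pvKey cards r) x t
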